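-- pv_equiv track=rewrite | github.com/Udj13/protocol-wialon-parameter-replacer-service | model.py | rearrange_data
-- ===== SOURCE A (Python) =====
-- def rearrange_data(s, parameter_name):
--     if s.find(parameter_name) == -1:
--         return s
--     position = s.find(parameter_name) + len(parameter_name) - 1
--     is_value_found = True
--     value = ''
--     while is_value_found:
--         position += 1
--         try:
--             next_char = s[position]
--             if next_char.isdigit() or next_char == '.':
--                 value += next_char
--             else:
--                 is_value_found = False
--         except IndexError:
--             is_value_found = False
--
--     splitted_data = s.split(';')
--     if splitted_data[13] == '':
--         splitted_data[13] = value
--     else: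
--         splitted_data[13] += "," + value
--     s = ';'.join(splitted_data)
--
--     return s
-- ===== SOURCE B (Python) =====
-- import re
--
--
-- def rearrange_data(s, parameter_name):
--     # One regex pass extracts the numeric value; field 13 is patched by direct
--     # string surgery (locate its boundaries) instead of split/assign/join.
--     m = re.search(re.escape(parameter_name) + r'([0-9.]*)', s)
--     if m is None:
--         return s
--     value = m.group(1)
--     start = 0
--     for _ in range(13):
--         start = s.index(';', start) + 1
--     end = s.find(';', start)
--     if end == -1:
--         end = len(s)
--     field = s[start:end]
--     new_field = value if field == '' else field + ',' + value
--     return s[:start] + new_field + s[end:]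
-- ===== Notes on version B (the rewrite author's own statement) =====
-- stated objective: alternative
-- what changed: B extracts the numeric value with one regex match (re.escape(name)+'([0-9.]*)') instead of A's index-advancing try/except character loop, and patches field 13 by locating its boundaries with s.index/s.find and splicing s[:start]+field+s[end:] instead of A's split(';')/assign/join.
import Mathlib
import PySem

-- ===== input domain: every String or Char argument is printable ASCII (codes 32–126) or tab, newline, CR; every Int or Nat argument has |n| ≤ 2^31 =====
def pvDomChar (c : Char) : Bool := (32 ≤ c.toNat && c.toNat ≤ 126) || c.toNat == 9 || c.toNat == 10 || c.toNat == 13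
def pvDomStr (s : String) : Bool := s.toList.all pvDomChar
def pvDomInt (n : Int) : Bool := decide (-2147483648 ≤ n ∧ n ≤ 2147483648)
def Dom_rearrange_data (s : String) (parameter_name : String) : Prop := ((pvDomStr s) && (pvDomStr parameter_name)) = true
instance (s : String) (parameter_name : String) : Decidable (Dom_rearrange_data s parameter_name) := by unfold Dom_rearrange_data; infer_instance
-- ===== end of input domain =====

-- B replaces A's index-advancing character loop (try/except IndexError) by a single
-- pattern match for the numeric value and replaces split/assign/join by direct string
-- surgery on the boundaries of field 13 (objective: alternative; same asymptotic cost).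

-- ===== PORT A =====
-- A's while loop: position += 1; read s[position]; collect digits/dots until a
-- non-member or IndexError.  Since the first read is at index find+len(p) ≥ 0 and the
-- index only increments, the loop reads exactly the successive characters of the
-- suffix s[find+len(p):]; ported as an accumulator recursion over that suffix (exact).
def pvAValLoop : List Char → List Char → List Char
  | [], value => value
  | c :: rest, value =>
      if PySem.Chars.isdigit c || c == '.' then pvAValLoop rest (value ++ [c]) else value

def rearrange_data (s : String) (parameter_name : String) : String :=
  let cs := s.toList
  if PySem.Chars.find cs parameter_name.toList == -1 then s
  else
    let position : Int := PySem.Chars.find cs parameter_name.toList + parameter_name.toList.length - 1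
    let value := pvAValLoop (cs.drop (position + 1).toNat) []
    let splitted_data := PySem.Chars.splitOn cs [';']
    match PySem.List.pyGet? splitted_data 13 with
    | none => ""   -- Python raises IndexError here (excluded by Pre_)
    | some f =>
        let f' := if f = [] then value else f ++ [','] ++ value
        String.ofList (PySem.Chars.join [';'] (splitted_data.set 13 f'))

-- ===== PORT B =====
-- Source B's 'for _ in range(13): start = s.index(';', start) + 1'; none = ValueError.
def pvBSemiLoop (cs : List Char) : Nat → Int → Option Int
  | 0, start => some start
  | n + 1, start =>
      let i := PySem.Chars.findFrom cs [';'] start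
      if i == -1 then none else pvBSemiLoop cs n (i + 1)

def rearrange_data_alt (s : String) (parameter_name : String) : String :=
  let cs := s.toList
  -- re.search(re.escape(parameter_name) + r'([0-9.]*)', s): the escaped literal matches
  -- exactly at the first occurrence (= s.find), and the greedy capture '([0-9.]*)' is the
  -- maximal run of digits/dots right after it (= takeWhile); exact on the ASCII domain.
  let i := PySem.Chars.find cs parameter_name.toList
  if i == -1 then s   -- m is None
  else
    let value := (cs.drop (i + parameter_name.toList.length).toNat).takeWhile
        (fun c => PySem.Chars.isdigit c || c == '.')
    match pvBSemiLoop cs 13 0 with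
    | none => ""   -- Python raises ValueError here (excluded by Pre_)
    | some start =>
        let e := PySem.Chars.findFrom cs [';'] start
        let endIdx : Int := if e == -1 then (cs.length : Int) else e
        let field := PySem.Chars.slice cs (some start) (some endIdx)
        let newField := if field = [] then value else field ++ [','] ++ value
        String.ofList (PySem.Chars.slice cs none (some start) ++ newField ++
                       PySem.Chars.slice cs (some endIdx) none)

-- ===== PRECONDITION & SPEC =====
-- Pre_ excludes exactly the inputs on which A raises: when the parameter occurs in s
-- but s has fewer than 14 ';'-separated fields, splitted_data[13] raises IndexError.
def Pre_rearrange_data (s : String) (parameter_name : String) : Prop :=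
  PySem.Chars.find s.toList parameter_name.toList = -1 ∨
  14 ≤ (PySem.Chars.splitOn s.toList [';']).length
instance (s : String) (parameter_name : String) : Decidable (Pre_rearrange_data s parameter_name) := by
  unfold Pre_rearrange_data; infer_instance

def pvWitness_rearrange_data : String × String := ("p7;;;;;;;;;;;;;", "p")

def Spec_rearrange_data (s : String) (parameter_name : String) (out : String) : Prop := out = rearrange_data_alt s parameter_name
instance (s : String) (parameter_name : String) (out : String) : Decidable (Spec_rearrange_data s parameter_name out) := by unfold Spec_rearrange_data; infer_instance

-- ===== CLAIM (what is proved, stated in full; the proofs are below) =====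
def Claim_equal_rearrange_data : Prop := ∀ (s : String) (parameter_name : String), Dom_rearrange_data s parameter_name → Pre_rearrange_data s parameter_name → Spec_rearrange_data s parameter_name (rearrange_data s parameter_name)

-- ===== LEMMAS AND PROOFS =====

-- A's value loop is takeWhile with an accumulator.
theorem pvAValLoop_eq (l acc : List Char) :
    pvAValLoop l acc = acc ++ l.takeWhile (fun c => PySem.Chars.isdigit c || c == '.') := by
  induction l generalizing acc with
  | nil => simp [pvAValLoop]
  | cons c r ih =>
      by_cases h : (PySem.Chars.isdigit c || c == '.') = true
      · simp [pvAValLoop, h, ih]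
      · simp [pvAValLoop, h]

-- Structural semicolon split (proof-side model of PySem.Chars.splitOn · [';']).
def pvSplit1 : List Char → List (List Char)
  | [] => [[]]
  | c :: r => if c = ';' then [] :: pvSplit1 r
              else (c :: (pvSplit1 r).headI) :: (pvSplit1 r).tail

theorem pvSplit1_ne_nil (cs : List Char) : pvSplit1 cs ≠ [] := by
  cases cs with
  | nil => simp [pvSplit1]
  | cons c r => by_cases h : c = ';' <;> simp [pvSplit1, h]

theorem pvGo_nil (f : Nat) (cur : List Char) (acc : List (List Char)) :
    PySem.Chars.splitOn.go [';'] (f + 1) [] cur acc = (cur.reverse :: acc).reverse := by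
  rw [PySem.Chars.splitOn.go.eq_def]

theorem pvGo_cons (f : Nat) (c : Char) (r cur : List Char) (acc : List (List Char)) :
    PySem.Chars.splitOn.go [';'] (f + 1) (c :: r) cur acc =
      if ([';'] : List Char).isPrefixOf (c :: r) = true then
        PySem.Chars.splitOn.go [';'] f (List.drop ([';'] : List Char).length (c :: r)) []
          (cur.reverse :: acc)
      else PySem.Chars.splitOn.go [';'] f r (c :: cur) acc := by
  rw [PySem.Chars.splitOn.go.eq_def]

theorem pvSplitOn_go_eq (l : List Char) : ∀ (fuel : Nat) (cur : List Char) (acc : List (List Char)),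
    l.length < fuel →
    PySem.Chars.splitOn.go [';'] fuel l cur acc =
      acc.reverse ++ (cur.reverse ++ (pvSplit1 l).headI) :: (pvSplit1 l).tail := by
  induction l with
  | nil =>
      intro fuel cur acc h
      cases fuel with
      | zero => omega
      | succ f => rw [pvGo_nil]; simp [pvSplit1]
  | cons c r ih =>
      intro fuel cur acc h
      cases fuel with
      | zero => omega
      | succ f =>
          rw [pvGo_cons]
          rcases hsp : pvSplit1 r with _ | ⟨a, t⟩
          · exact absurd hsp (pvSplit1_ne_nil r)
          · by_cases hc : c = ';'
            · subst hc
              rw [if_pos (by simp [List.isPrefixOf])]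
              have hdr : List.drop (List.length ([';'] : List Char)) (';' :: r) = r := rfl
              rw [hdr, ih f [] (List.reverse cur :: acc) (by simp at h; omega)]
              simp only [pvSplit1, if_pos, hsp]
              simp
            · rw [if_neg (by simp [List.isPrefixOf]; exact fun hh => absurd hh.symm hc)]
              rw [ih f (c :: cur) acc (by simp at h; omega)]
              simp only [pvSplit1, hsp]
              rw [if_neg hc]
              simp

theorem pvSplitOn_eq (cs : List Char) : PySem.Chars.splitOn cs [';'] = pvSplit1 cs := by
  rw [PySem.Chars.splitOn.eq_1, pvSplitOn_go_eq cs (cs.length + 1) [] [] (by omega)]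
  rcases hsp : pvSplit1 cs with _ | ⟨a, t⟩
  · exact absurd hsp (pvSplit1_ne_nil cs)
  · simp

theorem pvSplit1_clean (cs : List Char) : ∀ p ∈ pvSplit1 cs, ';' ∉ p := by
  induction cs with
  | nil => simp [pvSplit1]
  | cons c r ih =>
      by_cases hc : c = ';'
      · subst hc
        simp only [pvSplit1, if_pos]
        intro p hp
        rw [List.mem_cons] at hp
        rcases hp with hp | hp
        · simp [hp]
        · exact ih p hp
      · rcases hsp : pvSplit1 r with _ | ⟨a, t⟩
        · exact absurd hsp (pvSplit1_ne_nil r)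
        · simp only [pvSplit1, hsp]
          rw [if_neg hc]
          intro p hp
          rw [List.mem_cons] at hp
          rcases hp with hp | hp
          · subst hp
            have ha := ih a (by simp [hsp])
            simp only [List.headI, List.mem_cons, not_or]
            exact ⟨fun hh => absurd hh.symm hc, ha⟩
          · exact ih p (by rw [hsp]; exact List.mem_cons_of_mem _ (by simpa using hp))

theorem pvJoin_cons_head (sep : List Char) (x : Char) (h : List Char) (t : List (List Char)) :
    PySem.Chars.join sep ((x :: h) :: t) = x :: PySem.Chars.join sep (h :: t) := by
  cases t with
  | nil => simp [PySem.Chars.join_singleton]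
  | cons q r => simp [PySem.Chars.join_cons_cons]

theorem pvJoin_split1 (cs : List Char) : PySem.Chars.join [';'] (pvSplit1 cs) = cs := by
  induction cs with
  | nil => simp [pvSplit1, PySem.Chars.join_singleton]
  | cons c r ih =>
      rcases hsp : pvSplit1 r with _ | ⟨a, t⟩
      · exact absurd hsp (pvSplit1_ne_nil r)
      · rw [hsp] at ih
        by_cases hc : c = ';'
        · subst hc
          simp only [pvSplit1, if_pos, hsp]
          rw [PySem.Chars.join_cons_cons]
          simp [ih]
        · simp only [pvSplit1, hsp]
          rw [if_neg hc]
          simp only [List.headI, List.tail]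
          rw [pvJoin_cons_head]
          simp [ih]

theorem pvJoin_append (xs : List (List Char)) (y : List Char) (l : List (List Char)) (hx : xs ≠ []) :
    PySem.Chars.join [';'] (xs ++ y :: l) =
      PySem.Chars.join [';'] xs ++ [';'] ++ PySem.Chars.join [';'] (y :: l) := by
  induction xs with
  | nil => exact absurd rfl hx
  | cons x xs' ih =>
      cases xs' with
      | nil => simp [PySem.Chars.join_cons_cons, PySem.Chars.join_singleton]
      | cons x2 xs'' =>
          have h2 := ih (by simp)
          simp only [List.cons_append] at *
          rw [PySem.Chars.join_cons_cons, h2, PySem.Chars.join_cons_cons]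
          simp

theorem pvJoin_length (xs : List (List Char)) (hx : xs ≠ []) :
    (PySem.Chars.join [';'] xs).length = (xs.map List.length).sum + xs.length - 1 := by
  induction xs with
  | nil => exact absurd rfl hx
  | cons x xs' ih =>
      cases xs' with
      | nil => simp [PySem.Chars.join_singleton]
      | cons x2 xs'' =>
          have h2 := ih (by simp)
          rw [PySem.Chars.join_cons_cons]
          simp only [List.length_append, List.map_cons, List.sum_cons, List.length_cons,
            List.length_nil] at h2 ⊢
          omega

theorem pvFind_eq_of (cs sub : List Char) (j : Nat) (h1 : sub <+: cs.drop j)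
    (h2 : ∀ i < j, ¬ sub <+: cs.drop i) : PySem.Chars.find cs sub = (j : Int) := by
  have hin : PySem.Chars.isIn sub cs = true :=
    (PySem.Chars.exists_prefix_drop_iff_isIn sub cs).mp ⟨j, h1⟩
  have h0 : 0 ≤ PySem.Chars.find cs sub :=
    (PySem.Chars.find_nonneg_iff cs sub).mpr ((PySem.Chars.isIn_iff_infix sub cs).mp hin)
  obtain ⟨hpre, hmin⟩ := PySem.Chars.find_spec h0
  have hfj : (PySem.Chars.find cs sub).toNat = j := by
    rcases lt_trichotomy (PySem.Chars.find cs sub).toNat j with h | h | h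
    · exact absurd hpre (h2 _ h)
    · exact h
    · exact absurd h1 (hmin j h)
  omega

theorem pvFind_semi (p r : List Char) (hp : ';' ∉ p) :
    PySem.Chars.find (p ++ ';' :: r) [';'] = (p.length : Int) := by
  apply pvFind_eq_of
  · rw [List.drop_left]
    exact ⟨r, rfl⟩
  · intro i hi
    rw [List.drop_append_of_le_length (by omega)]
    rw [List.drop_eq_getElem_cons (by omega)]
    intro hpre
    rw [List.cons_append, List.cons_prefix_cons] at hpre
    exact hp (hpre.1 ▸ List.getElem_mem _)

theorem pvFind_semi_none (p : List Char) (hp : ';' ∉ p) :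
    PySem.Chars.find p [';'] = -1 := by
  rw [PySem.Chars.find_eq_neg_one_iff]
  intro h
  exact hp (List.singleton_sublist.mp h.sublist)

theorem pvSemiLoop_spec : ∀ (n : Nat) (parts : List (List Char)) (pref : List Char),
    (∀ p ∈ parts, ';' ∉ p) → n < parts.length →
    pvBSemiLoop (pref ++ PySem.Chars.join [';'] parts) n (pref.length : Int) =
      some (((pref.length + ((parts.take n).map List.length).sum + n : Nat) : Int)) := by
  intro n
  induction n with
  | zero => intro parts pref _ _; simp [pvBSemiLoop]
  | succ n ih =>
      intro parts pref hclean hlen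
      rcases parts with _ | ⟨p, rest⟩
      · simp at hlen
      · rcases rest with _ | ⟨q, t⟩
        · simp at hlen
        · have hjoin : PySem.Chars.join [';'] (p :: q :: t) =
              p ++ ';' :: PySem.Chars.join [';'] (q :: t) := by
            rw [PySem.Chars.join_cons_cons]; simp
          set cs := pref ++ PySem.Chars.join [';'] (p :: q :: t) with hcs
          have hdrop : cs.drop pref.length = p ++ ';' :: PySem.Chars.join [';'] (q :: t) := by
            rw [hcs, List.drop_left, hjoin]
          have hklen : pref.length ≤ cs.length := by
            rw [hcs]; simp
          have hfind : PySem.Chars.find (cs.drop pref.length) [';'] = (p.length : Int) := by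
            rw [hdrop]; exact pvFind_semi p _ (hclean p (by simp))
          have hne1 : ¬ ((p.length : Int) = -1) := by omega
          have hff : PySem.Chars.findFrom cs [';'] (pref.length : Int) =
              ((pref.length + p.length : Nat) : Int) := by
            rw [PySem.Chars.findFrom_natCast cs [';'] pref.length hklen, hfind, if_neg hne1]
            try push_cast
            try ring
            try omega
          have hne2 : ((((pref.length + p.length : Nat)) : Int) == -1) = false := by
            simp only [beq_eq_false_iff_ne, ne_eq]
            omega
          have harg : (((pref.length + p.length : Nat)) : Int) + 1 =
              (((pref.length + p.length + 1 : Nat)) : Int) := by push_cast; ring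
          have hstep : pvBSemiLoop cs (n + 1) (pref.length : Int) =
              pvBSemiLoop cs n (((pref.length + p.length + 1 : Nat)) : Int) := by
            simp only [pvBSemiLoop, hff, hne2, Bool.false_eq_true, if_false, harg]
          rw [hstep]
          have hcs2 : cs = (pref ++ p ++ [';']) ++ PySem.Chars.join [';'] (q :: t) := by
            rw [hcs, hjoin]; simp
          have hlen2 : (((pref ++ p ++ [';']).length : Nat) : Int) =
              ((pref.length + p.length + 1 : Nat) : Int) := by
            simp only [List.length_append, List.length_cons, List.length_nil]
            try omega
          rw [← hlen2, hcs2]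
          rw [ih (q :: t) (pref ++ p ++ [';']) (fun x hx => hclean x (by simp at hx ⊢; tauto))
              (by simp at hlen ⊢; omega)]
          congr 2
          rw [List.take_succ_cons]
          simp only [List.map_cons, List.sum_cons, List.length_append, List.length_cons,
            List.length_nil]
          omega

-- ===== VERDICT (by name: the statement is the Claim_ definition above) =====
theorem rearrange_data_spec : Claim_equal_rearrange_data := by
  unfold Claim_equal_rearrange_data
  intro s pn hdom hpre
  unfold Spec_rearrange_data rearrange_data rearrange_data_alt
  by_cases hf : PySem.Chars.find s.toList pn.toList = -1
  · simp [hf]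
  · have hge : 0 ≤ PySem.Chars.find s.toList pn.toList := by
      have := PySem.Chars.neg_one_le_find s.toList pn.toList; omega
    have hbeq : (PySem.Chars.find s.toList pn.toList == -1) = false := by
      simp [hf]
    simp only [hbeq, Bool.false_eq_true, if_false]
    unfold Pre_rearrange_data at hpre
    rw [pvSplitOn_eq s.toList]
    have hpre14 : 14 ≤ (pvSplit1 s.toList).length := by
      rcases hpre with h | h
      · exact absurd h hf
      · rwa [pvSplitOn_eq] at h
    have hclean : ∀ p ∈ pvSplit1 s.toList, ';' ∉ p := pvSplit1_clean s.toList
    have hjoinall : PySem.Chars.join [';'] (pvSplit1 s.toList) = s.toList :=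
      pvJoin_split1 s.toList
    set parts := pvSplit1 s.toList with hparts
    have h13 : 13 < parts.length := by omega
    have hdec : parts = parts.take 13 ++ parts[13] :: parts.drop 14 := by
      conv_lhs => rw [← List.take_append_drop 13 parts]
      rw [List.drop_eq_getElem_cons h13]
    have htk : (parts.take 13).length = 13 := by
      simp; omega
    have htkne : parts.take 13 ≠ [] := by
      intro h; rw [h] at htk; simp at htk
    -- values agree
    have hval : pvAValLoop (s.toList.drop
          (PySem.Chars.find s.toList pn.toList + (pn.toList.length : Int) - 1 + 1).toNat) [] =
        (s.toList.drop ((PySem.Chars.find s.toList pn.toList + (pn.toList.length : Int)).toNat)).takeWhile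
          (fun c => PySem.Chars.isdigit c || c == '.') := by
      rw [pvAValLoop_eq]
      have harg : PySem.Chars.find s.toList pn.toList + (pn.toList.length : Int) - 1 + 1 =
          PySem.Chars.find s.toList pn.toList + (pn.toList.length : Int) := by ring
      rw [harg, List.nil_append]
    -- A side: the 13th field
    have hget : PySem.List.pyGet? parts (13 : Int) = some parts[13] := by
      rw [show (13 : Int) = ((13 : Nat) : Int) by norm_num, PySem.List.pyGet?_natCast]
      exact List.getElem?_eq_getElem h13
    -- B side: the semicolon loop and the field boundaries
    set sum13 := ((parts.take 13).map List.length).sum with hsum13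
    have hloop : pvBSemiLoop s.toList 13 (0 : Int) = some (((sum13 + 13 : Nat)) : Int) := by
      have h := pvSemiLoop_spec 13 parts [] hclean h13
      simp only [List.nil_append, List.length_nil, Nat.cast_zero, Nat.zero_add] at h
      rw [hjoinall] at h
      exact h
    set startN : Nat := sum13 + 13 with hstartN
    have hJlen : (PySem.Chars.join [';'] (parts.take 13)).length + 1 = startN := by
      rw [pvJoin_length _ htkne, htk, ← hsum13]
      omega
    have hcseq : s.toList = (PySem.Chars.join [';'] (parts.take 13) ++ [';']) ++
        PySem.Chars.join [';'] (parts[13] :: parts.drop 14) := by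
      conv_lhs => rw [← hjoinall]
      conv_lhs => rw [hdec]
      rw [pvJoin_append _ _ _ htkne]
      try simp
    have hpfxlen : (PySem.Chars.join [';'] (parts.take 13) ++ [';']).length = startN := by
      simp only [List.length_append, List.length_cons, List.length_nil]
      omega
    have hdropS : s.toList.drop startN = PySem.Chars.join [';'] (parts[13] :: parts.drop 14) := by
      conv_lhs => rw [hcseq, ← hpfxlen]
      exact List.drop_left
    have htakeS : s.toList.take startN = PySem.Chars.join [';'] (parts.take 13) ++ [';'] := by
      conv_lhs => rw [hcseq, ← hpfxlen]
      exact List.take_left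
    have hslen : startN ≤ s.toList.length := by
      rw [hcseq, List.length_append, hpfxlen]
      omega
    have hcl13 : ';' ∉ parts[13] := hclean _ (List.getElem_mem _)
    -- now case on whether field 13 is the last field
    rcases hrest : parts.drop 14 with _ | ⟨q, t⟩
    · -- field 13 is the last field: no ';' after it, e = -1
      have hdropS' : s.toList.drop startN = parts[13] := by
        rw [hdropS, hrest, PySem.Chars.join_singleton]
      have hlen' : s.toList.length = startN + parts[13].length := by
        conv_lhs => rw [← List.take_append_drop startN s.toList]
        rw [List.length_append, hdropS', List.length_take_of_le hslen]
      have he : PySem.Chars.findFrom s.toList [';'] ((startN : Nat) : Int) = -1 := by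
        rw [PySem.Chars.findFrom_natCast _ _ _ hslen, hdropS',
          pvFind_semi_none _ hcl13]
        simp
      simp only [hloop, hget, hval, he]
      rw [if_pos (by decide : ((-1 : Int) == -1) = true)]
      have hsl1 : PySem.Chars.slice s.toList (some ((startN : Nat) : Int))
          (some ((s.toList.length : Nat) : Int)) = parts[13] := by
        rw [PySem.Chars.slice_eq_listSlice, PySem.List.slice_natCast, hdropS']
        rw [List.take_of_length_le (by omega)]
      have hsl2 : PySem.Chars.slice s.toList none (some ((startN : Nat) : Int)) =
          PySem.Chars.join [';'] (parts.take 13) ++ [';'] := by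
        rw [PySem.Chars.slice_eq_listSlice, PySem.List.slice_to_natCast, htakeS]
      have hsl3 : PySem.Chars.slice s.toList (some ((s.toList.length : Nat) : Int)) none =
          ([] : List Char) := by
        rw [PySem.Chars.slice_eq_listSlice, PySem.List.slice_from_natCast, List.drop_length]
      rw [hsl1, hsl2, hsl3]
      congr 1
      generalize (if parts[13] = [] then
          (s.toList.drop ((PySem.Chars.find s.toList pn.toList + (pn.toList.length : Int)).toNat)).takeWhile
            (fun c => PySem.Chars.isdigit c || c == '.')
        else parts[13] ++ [','] ++
          (s.toList.drop ((PySem.Chars.find s.toList pn.toList + (pn.toList.length : Int)).toNat)).takeWhile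
            (fun c => PySem.Chars.isdigit c || c == '.')) = F
      have hset : parts.set 13 F = parts.take 13 ++ F :: parts.drop 14 := by
        rw [List.set_eq_take_append_cons_drop, if_pos h13]
      rw [hset, hrest, pvJoin_append _ _ _ htkne, PySem.Chars.join_singleton]
      simp [List.append_assoc]
    · -- there is a ';' after field 13
      have hdropS' : s.toList.drop startN =
          parts[13] ++ ';' :: PySem.Chars.join [';'] (q :: t) := by
        rw [hdropS, hrest, PySem.Chars.join_cons_cons]
        simp
      have hne3 : ¬ (((parts[13].length : Nat) : Int) = -1) := by omega
      have he : PySem.Chars.findFrom s.toList [';'] ((startN : Nat) : Int) =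
          ((startN + parts[13].length : Nat) : Int) := by
        rw [PySem.Chars.findFrom_natCast _ _ _ hslen, hdropS', pvFind_semi _ _ hcl13,
          if_neg hne3]
        try push_cast
        try ring
        try omega
      have hdropE : s.toList.drop (startN + parts[13].length) =
          ';' :: PySem.Chars.join [';'] (q :: t) := by
        have hsplit : s.toList = (s.toList.take startN ++ parts[13]) ++
            ';' :: PySem.Chars.join [';'] (q :: t) := by
          conv_lhs => rw [← List.take_append_drop startN s.toList]
          rw [hdropS']
          simp
        have hlenp : (s.toList.take startN ++ parts[13]).length = startN + parts[13].length := by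
          rw [List.length_append, List.length_take_of_le hslen]
        conv_lhs => rw [hsplit, ← hlenp]
        exact List.drop_left
      have hne4 : ((((startN + parts[13].length : Nat)) : Int) == -1) = false := by
        simp only [beq_eq_false_iff_ne, ne_eq]
        omega
      simp only [hloop, hget, hval, he, hne4, Bool.false_eq_true, if_false]
      have hsl1 : PySem.Chars.slice s.toList (some ((startN : Nat) : Int))
          (some (((startN + parts[13].length : Nat)) : Int)) = parts[13] := by
        rw [PySem.Chars.slice_eq_listSlice, PySem.List.slice_natCast, hdropS']
        rw [Nat.add_sub_cancel_left]
        exact List.take_left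
      have hsl2 : PySem.Chars.slice s.toList none (some ((startN : Nat) : Int)) =
          PySem.Chars.join [';'] (parts.take 13) ++ [';'] := by
        rw [PySem.Chars.slice_eq_listSlice, PySem.List.slice_to_natCast, htakeS]
      have hsl3 : PySem.Chars.slice s.toList (some (((startN + parts[13].length : Nat)) : Int)) none =
          ';' :: PySem.Chars.join [';'] (q :: t) := by
        rw [PySem.Chars.slice_eq_listSlice, PySem.List.slice_from_natCast, hdropE]
      rw [hsl1, hsl2, hsl3]
      congr 1
      generalize (if parts[13] = [] then
          (s.toList.drop ((PySem.Chars.find s.toList pn.toList + (pn.toList.length : Int)).toNat)).takeWhile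
            (fun c => PySem.Chars.isdigit c || c == '.')
        else parts[13] ++ [','] ++
          (s.toList.drop ((PySem.Chars.find s.toList pn.toList + (pn.toList.length : Int)).toNat)).takeWhile
            (fun c => PySem.Chars.isdigit c || c == '.')) = F
      have hset : parts.set 13 F = parts.take 13 ++ F :: parts.drop 14 := by
        rw [List.set_eq_take_append_cons_drop, if_pos h13]
      rw [hset, hrest, pvJoin_append _ _ _ htkne, PySem.Chars.join_cons_cons]
      simp [List.append_assoc]
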